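-- pv_equiv track=rewrite | github.com/millenquincent/Social_Cooice_Pr-ferenzintensit-ten | 00_cses_imd_analyse_code.py | Aus_Skala_Ranking_machen
-- ===== SOURCE A (Python) =====
-- def Aus_Skala_Ranking_machen(Liste: list):
--     unique_sorted_values = sorted(set(Liste), reverse=True)
--
--
--     New_List = [0]*len(Liste)
--     for i in range(0,len(unique_sorted_values)):
--         second_highest = unique_sorted_values[i] if len(unique_sorted_values) > 1 else unique_sorted_values[0]
--         indices_second_highest = [index for index, value in enumerate(Liste) if value == second_highest]
--         for t in range(0,len(indices_second_highest)):
--             New_List[indices_second_highest[t]] = i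
--
--     count = 0
--     for i in range(0,len(Liste)):
--         if Liste[i] > 10:
--             New_List[i] = 98
--             count = count+1
--     if count == 0:
--         New_List = [x + 1 for x in New_List]
--
--     return New_List
-- ===== SOURCE B (Python) =====
-- def Aus_Skala_Ranking_machen(Liste: list):
--     uniq = set(Liste)
--     big = any(v > 10 for v in Liste)
--     out = []
--     for v in Liste:
--         if v > 10:
--             out.append(98)
--         else:
--             r = sum(1 for u in uniq if u > v)
--             out.append(r if big else r + 1)
--     return out
-- ===== Notes on version B (the rewrite author's own statement) =====
-- stated objective: simpler
-- what changed: Replaces A's scatter passes (sort the distinct values descending, then for each of them rescan the whole list to write its rank) and the separate 98-override/count/shift passes by one direct pass that computes each element's rank as the number of distinct values greater than it, with the >10 override and the +1 shift decided inline.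
import Mathlib
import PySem

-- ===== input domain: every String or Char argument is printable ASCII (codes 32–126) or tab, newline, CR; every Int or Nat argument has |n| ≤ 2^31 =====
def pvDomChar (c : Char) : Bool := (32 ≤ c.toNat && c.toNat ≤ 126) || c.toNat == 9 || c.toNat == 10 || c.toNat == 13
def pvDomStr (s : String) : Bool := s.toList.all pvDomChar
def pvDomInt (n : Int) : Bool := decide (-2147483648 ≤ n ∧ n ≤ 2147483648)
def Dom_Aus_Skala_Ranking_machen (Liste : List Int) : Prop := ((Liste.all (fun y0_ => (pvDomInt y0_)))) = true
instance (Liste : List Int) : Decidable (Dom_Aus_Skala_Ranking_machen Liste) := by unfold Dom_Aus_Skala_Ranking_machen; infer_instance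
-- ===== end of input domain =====

-- B replaces A's per-distinct-value rescans and separate override/count/shift passes by one
-- direct pass computing each rank as the count of strictly greater distinct values (simpler).

-- ===== PORT A =====
def Aus_Skala_Ranking_machen (Liste : List Int) : List Int :=
  let unique_sorted_values := PySem.List.sorted (PySem.Set.ofList Liste) (fun x => x) true
  let New_List0 : List Int := List.replicate Liste.length 0
  let New_List1 := (PySem.List.pyRange 0 (unique_sorted_values.length : Int) 1).foldl
    (fun acc i =>
      let second_highest :=
        if unique_sorted_values.length > 1 then PySem.List.pyGetD unique_sorted_values i 0
        else PySem.List.pyGetD unique_sorted_values 0 0   -- index always in range: pyGetD is exact here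
      let indices_second_highest :=
        ((PySem.List.enumerate Liste 0).filter (fun p => p.2 == second_highest)).map (fun p => p.1)
      (PySem.List.pyRange 0 (indices_second_highest.length : Int) 1).foldl
        (fun a t => a.set (PySem.List.pyGetD indices_second_highest t 0).toNat i) acc)
    New_List0
  let sc := (PySem.List.pyRange 0 (Liste.length : Int) 1).foldl
    (fun (s : List Int × Int) i =>
      if PySem.List.pyGetD Liste i 0 > 10 then (s.1.set i.toNat 98, s.2 + 1) else s)
    (New_List1, (0 : Int))
  if sc.2 == 0 then sc.1.map (fun x => x + 1) else sc.1

-- ===== PORT B =====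
def Aus_Skala_Ranking_machen_alt (Liste : List Int) : List Int :=
  let uniq := PySem.Set.ofList Liste
  let big := Liste.any (fun v => v > 10)
  Liste.foldl (fun out v =>
    if v > 10 then out ++ [(98 : Int)]
    else
      let r := uniq.foldl (fun acc u => if u > v then acc + 1 else acc) (0 : Int)
      out ++ [if big then r else r + 1]) []

-- ===== PRECONDITION & SPEC =====
def Spec_Aus_Skala_Ranking_machen (Liste : List Int) (out : List Int) : Prop := out = Aus_Skala_Ranking_machen_alt Liste
instance (Liste : List Int) (out : List Int) : Decidable (Spec_Aus_Skala_Ranking_machen Liste out) := by unfold Spec_Aus_Skala_Ranking_machen; infer_instance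

-- ===== CLAIM (what is proved, stated in full; the proofs are below) =====
def Claim_equal_Aus_Skala_Ranking_machen : Prop := ∀ (Liste : List Int), Dom_Aus_Skala_Ranking_machen Liste → Spec_Aus_Skala_Ranking_machen Liste (Aus_Skala_Ranking_machen Liste)

-- ===== LEMMAS AND PROOFS =====

-- the rank of v : number of distinct values of L strictly greater than v
def pvRank (L : List Int) (v : Int) : Nat :=
  (PySem.Set.ofList L).countP (fun u => decide (u > v))

-- one pass of A's scatter loop, in canonical form (proof-side helper)
def pvStep (L usv : List Int) (acc : List Int) (k : Nat) : List Int :=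
  (((PySem.List.enumerate L 0).filter (fun p => p.2 == usv.getD k 0)).map (fun p => p.1)).foldl
    (fun a t => a.set t.toNat (k : Int)) acc

-- range(0, m) over a Nat length, as a mapped List.range
theorem pvRange_cast (m : Nat) :
    PySem.List.pyRange 0 (m : Int) 1 = (List.range m).map (fun (k : Nat) => (k : Int)) := by
  apply List.ext_getElem
  · simp [PySem.List.length_pyRange_one]
  · intro i h1 h2
    simp [PySem.List.getElem_pyRange_one]

-- a fold of in-place writes of one value, pointwise
theorem pvSetFold_get? (val : Int) (idxs : List Int) (hnn : ∀ t ∈ idxs, 0 ≤ t) :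
    ∀ (a : List Int) (j : Nat),
      (idxs.foldl (fun a' t => a'.set t.toNat val) a)[j]? =
        if (j : Int) ∈ idxs then (if j < a.length then some val else a[j]?) else a[j]? := by
  induction idxs with
  | nil => intro a j; simp
  | cons t ts ih =>
    intro a j
    have ht : 0 ≤ t := hnn t (by simp)
    have ih' := ih (fun x hx => hnn x (by simp [hx]))
    simp only [List.foldl_cons, ih' (a.set t.toNat val) j, List.length_set,
      List.getElem?_set, List.mem_cons]
    by_cases hjt : (j : Int) = t
    · have h0 : t.toNat = j := by omega
      by_cases hmem : (j : Int) ∈ ts <;> by_cases hlt : j < a.length <;>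
        simp [hjt, hmem, hlt, h0]
    · have h0 : t.toNat ≠ j := by omega
      by_cases hmem : (j : Int) ∈ ts <;> by_cases hlt : j < a.length <;>
        simp [hjt, hmem, hlt, h0]

theorem pvSetFold_len (val : Int) (idxs : List Int) :
    ∀ (a : List Int), (idxs.foldl (fun a' t => a'.set t.toNat val) a).length = a.length := by
  induction idxs with
  | nil => intro a; simp
  | cons t ts ih => intro a; simp [List.foldl_cons, ih, List.length_set]

-- membership in A's indices_second_highest list
theorem pvIndices_mem (L : List Int) (w : Int) (j : Nat) :
    ((j : Int) ∈ ((PySem.List.enumerate L 0).filter (fun p => p.2 == w)).map (fun p => p.1)) ↔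
      (j < L.length ∧ L[j]? = some w) := by
  simp only [List.mem_map, List.mem_filter, PySem.List.mem_enumerate_iff]
  constructor
  · rintro ⟨p, ⟨⟨k, hk, hp⟩, hw⟩, hj⟩
    subst hp
    simp only [beq_iff_eq] at hw
    simp only [zero_add] at hj
    have : k = j := by omega
    subst this
    exact ⟨hk, by simp [List.getElem?_eq_getElem hk, hw]⟩
  · rintro ⟨hj, hw⟩
    refine ⟨((j : Int), L[j]), ⟨⟨j, hj, by simp⟩, ?_⟩, by simp⟩
    have := List.getElem?_eq_getElem hj
    rw [this] at hw
    simp only [beq_iff_eq]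
    exact Option.some_injective _ hw

theorem pvIndices_nonneg (L : List Int) (w : Int) :
    ∀ t ∈ ((PySem.List.enumerate L 0).filter (fun p => p.2 == w)).map (fun p => p.1), 0 ≤ t := by
  intro t ht
  simp only [List.mem_map, List.mem_filter, PySem.List.mem_enumerate_iff] at ht
  obtain ⟨p, ⟨⟨k, hk, hp⟩, _⟩, hj⟩ := ht
  subst hp; simp at hj; omega

-- strictly decreasing list: countP (· > l[k]) = k
theorem pvRank_of_getElem (l : List Int) (hl : l.Pairwise (· > ·)) :
    ∀ (k : Nat) (hk : k < l.length), l.countP (fun u => decide (u > l[k])) = k := by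
  induction l with
  | nil => intro k hk; simp at hk
  | cons u t ih =>
    intro k hk
    rcases List.pairwise_cons.mp hl with ⟨hu, ht⟩
    cases k with
    | zero =>
      simp only [List.getElem_cons_zero, List.countP_cons]
      have h1 : t.countP (fun x => decide (x > u)) = 0 := by
        rw [List.countP_eq_zero]
        intro x hx; simpa using not_lt.mpr (le_of_lt (hu x hx))
      simp [h1]
    | succ k =>
      have hk' : k < t.length := by simpa using hk
      have h2 : u > t[k] := hu _ (List.getElem_mem hk')
      have h3 := ih ht k hk'
      simp only [List.getElem_cons_succ, List.countP_cons, gt_iff_lt] at h3 ⊢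
      simp only [h2, decide_true, if_true]
      omega

-- the sorted distinct-value list is strictly decreasing
theorem pvUsv_sorted (L : List Int) :
    (PySem.List.sorted (PySem.Set.ofList L) (fun x => x) true).Pairwise (· > ·) := by
  have hperm : (PySem.List.sorted (PySem.Set.ofList L) (fun x => x) true).Perm
      (PySem.Set.ofList L) := PySem.List.sorted_perm _ _ _
  have hnd : (PySem.List.sorted (PySem.Set.ofList L) (fun x => x) true).Nodup :=
    hperm.nodup_iff.mpr (PySem.Set.nodup_ofList L)
  have hne : (PySem.List.sorted (PySem.Set.ofList L) (fun x => x) true).Pairwise (· ≠ ·) := hnd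
  have hge : (PySem.List.sorted (PySem.Set.ofList L) (fun x => x) true).Pairwise
      (fun a b => b ≤ a) := PySem.List.sorted_pairwise_rev _ _
  exact (hne.and hge).imp (fun h => lt_of_le_of_ne h.2 h.1.symm)

-- pointwise characterization of one canonical scatter step
theorem pvStep_get? (L usv : List Int) (acc : List Int) (k : Nat) (j : Nat)
    (hlen : acc.length = L.length) :
    (pvStep L usv acc k)[j]? =
      if j < L.length ∧ L[j]? = some (usv.getD k 0) then some (k : Int) else acc[j]? := by
  unfold pvStep
  rw [pvSetFold_get? _ _ (pvIndices_nonneg L (usv.getD k 0)) acc j]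
  by_cases h : j < L.length ∧ L[j]? = some (usv.getD k 0)
  · rw [if_pos ((pvIndices_mem L (usv.getD k 0) j).mpr h)]
    rw [if_pos (show j < acc.length by omega)]
    rw [if_pos h]
  · rw [if_neg (fun hc => h ((pvIndices_mem L (usv.getD k 0) j).mp hc)), if_neg h]

theorem pvStep_len (L usv : List Int) (acc : List Int) (k : Nat) :
    (pvStep L usv acc k).length = acc.length := by
  unfold pvStep; exact pvSetFold_len _ _ acc

-- the scatter-loop invariant
theorem pvScatterInv (L usv : List Int) (hsd : usv.Pairwise (· > ·)) :
    ∀ m, m ≤ usv.length →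
      ((List.range m).foldl (pvStep L usv) (List.replicate L.length 0)).length = L.length ∧
      ∀ j, (hj : j < L.length) →
        ((List.range m).foldl (pvStep L usv) (List.replicate L.length 0))[j]? =
          some (if L[j] ∈ usv.take m then (usv.countP (fun u => decide (u > L[j])) : Int) else 0) := by
  intro m
  induction m with
  | zero =>
    intro _
    refine ⟨by simp, ?_⟩
    intro j hj
    simp [hj]
  | succ m ih =>
    intro hm1
    have hm : m ≤ usv.length := by omega
    have hm' : m < usv.length := by omega
    obtain ⟨ihlen, ihget⟩ := ih hm
    rw [List.range_succ, List.foldl_append, List.foldl_cons, List.foldl_nil]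
    refine ⟨by rw [pvStep_len, ihlen], ?_⟩
    intro j hj
    rw [pvStep_get? L usv _ m j ihlen]
    have hgd : usv.getD m 0 = usv[m] := List.getD_eq_getElem usv 0 hm'
    have htk : usv.take (m + 1) = usv.take m ++ [usv[m]] := by
      rw [List.take_add_one, List.getElem?_eq_getElem hm']; rfl
    by_cases hLj : L[j] = usv[m]
    · rw [if_pos ⟨hj, by rw [List.getElem?_eq_getElem hj, hLj, hgd]⟩]
      have hmemtake : L[j] ∈ usv.take (m + 1) := by
        rw [hLj, htk]
        exact List.mem_append_right _ (List.mem_singleton_self _)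
      rw [if_pos hmemtake, hLj, pvRank_of_getElem usv hsd m hm']
    · rw [if_neg (by
        rintro ⟨-, hc⟩
        rw [List.getElem?_eq_getElem hj, hgd] at hc
        exact hLj (Option.some_injective _ hc))]
      rw [ihget j hj]
      have hiff : (L[j] ∈ usv.take (m + 1)) ↔ (L[j] ∈ usv.take m) := by
        rw [htk, List.mem_append, List.mem_singleton]
        exact or_iff_left hLj
      simp only [hiff]

-- A's loop body over a Nat-valued loop counter (proof-side helper)
def pvStepA (L usv : List Int) (acc : List Int) (k : Nat) : List Int :=
  let second_highest :=
    if usv.length > 1 then PySem.List.pyGetD usv ((k : Nat) : Int) 0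
    else PySem.List.pyGetD usv 0 0
  let indices_second_highest :=
    ((PySem.List.enumerate L 0).filter (fun p => p.2 == second_highest)).map (fun p => p.1)
  (PySem.List.pyRange 0 (indices_second_highest.length : Int) 1).foldl
    (fun a t => a.set (PySem.List.pyGetD indices_second_highest t 0).toNat ((k : Nat) : Int)) acc

theorem pvStepA_eq (L usv : List Int) (acc : List Int) (k : Nat) (hk : k < usv.length) :
    pvStepA L usv acc k = pvStep L usv acc k := by
  unfold pvStepA pvStep
  have hsh : (if usv.length > 1 then PySem.List.pyGetD usv ((k : Nat) : Int) 0
      else PySem.List.pyGetD usv 0 0) = usv.getD k 0 := by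
    by_cases h1 : usv.length > 1
    · rw [if_pos h1, PySem.List.pyGetD_natCast]
    · have : k = 0 := by omega
      subst this
      rw [if_neg h1, PySem.List.pyGetD_zero]
  simp only [hsh]
  rw [PySem.List.foldl_pyRange_zero_pyGetD'
    (xs := ((PySem.List.enumerate L 0).filter (fun p => p.2 == usv.getD k 0)).map (fun p => p.1))
    (f := fun a (t : Int) => a.set t.toNat ((k : Nat) : Int)) (d := 0) (init := acc)]

-- first stage of A computes the rank of every element
theorem pvStageOne (L : List Int) :
    (PySem.List.pyRange 0 ((PySem.List.sorted (PySem.Set.ofList L) (fun x => x) true).length : Int) 1).foldl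
      (fun acc i =>
        let second_highest :=
          if (PySem.List.sorted (PySem.Set.ofList L) (fun x => x) true).length > 1 then
            PySem.List.pyGetD (PySem.List.sorted (PySem.Set.ofList L) (fun x => x) true) i 0
          else PySem.List.pyGetD (PySem.List.sorted (PySem.Set.ofList L) (fun x => x) true) 0 0
        let indices_second_highest :=
          ((PySem.List.enumerate L 0).filter (fun p => p.2 == second_highest)).map (fun p => p.1)
        (PySem.List.pyRange 0 (indices_second_highest.length : Int) 1).foldl
          (fun a t => a.set (PySem.List.pyGetD indices_second_highest t 0).toNat i) acc)
      (List.replicate L.length 0) = L.map (fun v => (pvRank L v : Int)) := by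
  set usv := PySem.List.sorted (PySem.Set.ofList L) (fun x => x) true with husv
  rw [pvRange_cast, List.foldl_map]
  show (List.range usv.length).foldl (pvStepA L usv) (List.replicate L.length 0)
      = L.map (fun v => (pvRank L v : Int))
  have hcg : ∀ (acc : List Int), ∀ k ∈ List.range usv.length,
      pvStepA L usv acc k = pvStep L usv acc k := by
    intro acc k hk
    exact pvStepA_eq L usv acc k (List.mem_range.mp hk)
  refine Eq.trans (PySem.List.foldl_congr_mem _ _ _ _ hcg) ?_
  obtain ⟨hlen, hget⟩ := pvScatterInv L usv (pvUsv_sorted L) usv.length (le_refl _)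
  apply List.ext_getElem?
  intro j
  by_cases hj : j < L.length
  · rw [hget j hj, List.getElem?_map, List.getElem?_eq_getElem hj]
    have hmem : L[j] ∈ usv.take usv.length := by
      rw [List.take_length, husv, PySem.List.mem_sorted]
      exact (PySem.Set.mem_ofList _ _).mpr (List.getElem_mem hj)
    rw [if_pos hmem]
    have hcnt : usv.countP (fun u => decide (u > L[j])) = pvRank L L[j] := by
      unfold pvRank
      exact (PySem.List.sorted_perm _ _ _).countP_eq _
    rw [hcnt]
    rfl
  · rw [List.getElem?_eq_none (by rw [hlen]; omega),
      List.getElem?_eq_none (by rw [List.length_map]; omega)]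

-- the override/count pass of A, starting from a mapped list
theorem pvCountLoop (L : List Int) (g : Int → Int) :
    (PySem.List.pyRange 0 (L.length : Int) 1).foldl
      (fun (s : List Int × Int) i =>
        if PySem.List.pyGetD L i 0 > 10 then (s.1.set i.toNat 98, s.2 + 1) else s)
      (L.map g, (0 : Int)) =
      (L.map (fun v => if v > 10 then 98 else g v), (L.countP (fun v => decide (v > 10)) : Int)) := by
  rw [pvRange_cast, List.foldl_map]
  have main : ∀ m, m ≤ L.length →
      (List.range m).foldl
        (fun (s : List Int × Int) (k : Nat) =>
          if PySem.List.pyGetD L ((k : Nat) : Int) 0 > 10 then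
            (s.1.set ((k : Nat) : Int).toNat 98, s.2 + 1) else s)
        (L.map g, (0 : Int)) =
        ((L.take m).map (fun v => if v > 10 then 98 else g v) ++ (L.drop m).map g,
          ((L.take m).countP (fun v => decide (v > 10)) : Int)) := by
    intro m
    induction m with
    | zero => intro _; simp
    | succ m ih =>
      intro hm1
      have hm : m < L.length := by omega
      rw [List.range_succ, List.foldl_append, List.foldl_cons, List.foldl_nil, ih (by omega)]
      have hgd : PySem.List.pyGetD L ((m : Nat) : Int) 0 = L[m] := by
        rw [PySem.List.pyGetD_natCast]; exact List.getD_eq_getElem L 0 hm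
      have htk : L.take (m + 1) = L.take m ++ [L[m]] := by
        rw [List.take_add_one, List.getElem?_eq_getElem hm]; rfl
      have hdr : L.drop m = L[m] :: L.drop (m + 1) := List.drop_eq_getElem_cons hm
      have hlen : ((L.take m).map (fun v => if v > 10 then 98 else g v)).length = m := by
        simp [List.length_take, Nat.min_eq_left (le_of_lt hm)]
      by_cases hv : L[m] > 10
      · rw [if_pos (by rw [hgd]; exact hv)]
        simp only [Int.toNat_natCast]
        rw [Prod.mk.injEq]
        refine ⟨?_, ?_⟩
        · rw [hdr, List.map_cons, List.set_append_right _ _ (by omega), hlen,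
            Nat.sub_self, List.set_cons_zero, htk, List.map_append, List.map_singleton,
            if_pos hv, List.append_assoc]
          rfl
        · rw [htk, List.countP_append]
          simp [hv]
      · rw [if_neg (by rw [hgd]; exact hv)]
        rw [Prod.mk.injEq]
        refine ⟨?_, ?_⟩
        · rw [htk, hdr, List.map_append, List.map_cons, List.map_cons]
          simp [hv]
        · rw [htk, List.countP_append]
          simp [hv]
  have h := main L.length (le_refl _)
  rw [List.take_length, List.drop_length, List.map_nil, List.append_nil] at h
  exact h

-- B is a single map
theorem pvAltMap (L : List Int) :
    Aus_Skala_Ranking_machen_alt L =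
      L.map (fun v => if v > 10 then (98 : Int)
        else if L.any (fun v => v > 10) then (pvRank L v : Int) else (pvRank L v : Int) + 1) := by
  unfold Aus_Skala_Ranking_machen_alt
  have hbody : (fun (out : List Int) (v : Int) =>
      if v > 10 then out ++ [(98 : Int)]
      else
        let r := (PySem.Set.ofList L).foldl (fun acc u => if u > v then acc + 1 else acc) (0 : Int)
        out ++ [if L.any (fun v => v > 10) then r else r + 1]) =
      (fun out v => out ++ [if v > 10 then (98 : Int)
        else if L.any (fun v => v > 10) then (pvRank L v : Int) else (pvRank L v : Int) + 1]) := by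
    funext out v
    by_cases hv : v > 10
    · simp [hv]
    · have hr : (PySem.Set.ofList L).foldl (fun acc u => if u > v then acc + 1 else acc) (0 : Int)
          = (pvRank L v : Int) := by
        rw [PySem.List.foldl_ite_add_one]
        unfold pvRank
        simp
      simp only [hv, if_false, hr]
  simp only [hbody]
  rw [PySem.List.foldl_append_singleton_eq_map, List.nil_append]

-- countP (> 10) = 0 exactly when no element exceeds 10
theorem pvBig_iff (L : List Int) :
    (L.countP (fun v => decide (v > 10)) = 0) ↔ L.any (fun v => v > 10) = false := by
  rw [List.countP_eq_zero, List.any_eq_false]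

-- ===== VERDICT (by name: the statement is the Claim_ definition above) =====
theorem Aus_Skala_Ranking_machen_spec : Claim_equal_Aus_Skala_Ranking_machen := by
  intro L _
  unfold Spec_Aus_Skala_Ranking_machen Aus_Skala_Ranking_machen
  simp only []
  rw [pvStageOne L, pvCountLoop L (fun v => (pvRank L v : Int)), pvAltMap L]
  by_cases hbig : L.any (fun v => v > 10) = true
  · have hc : ((L.countP (fun v => decide (v > 10)) : Int) == 0) = false := by
      rw [beq_eq_false_iff_ne]
      intro h
      have h0 : L.countP (fun v => decide (v > 10)) = 0 := by exact_mod_cast h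
      rw [pvBig_iff, hbig] at h0
      simp at h0
    simp [hc, hbig]
  · have hb : L.any (fun v => v > 10) = false := by
      cases h : L.any (fun v => v > 10)
      · rfl
      · exact absurd h hbig
    have hc0 : L.countP (fun v => decide (v > 10)) = 0 := (pvBig_iff L).mpr hb
    have hc : ((L.countP (fun v => decide (v > 10)) : Int) == 0) = true := by
      simp [hc0]
    simp only [hc, if_true, hb, List.map_map]
    apply List.map_congr_left
    intro v hv
    have hv10 : ¬ v > 10 := by
      rw [List.any_eq_false] at hb
      simpa using hb v hv
    simp [hv10]
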